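-- pv_equiv track=rewrite | github.com/DVTyuriy/Python_Basic_Lessons | Last_Home_Work/FileProcessor.py | how_to_warehouse
-- ===== SOURCE A (Python) =====
-- import operator
--
-- def how_to_warehouse(list1: list) -> dict:
--     """
--     Фунція. яка рахує, скільки товарів "пройшло" через кожний склад
--     :param list1: список всїх операцій
--     :return: скільки товарів "пройшло" через кожний склад в сортованому вигляді
--     """
--     population = dict()
--     for row in list1:
--         for ind in row:
--             if ind['warehouse'] not in population:
--                 population[ind['warehouse']] = 0
--             population[ind['warehouse']] += 1
--     population = dict(sorted(population.items(), key=operator.itemgetter(0)))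
--     return population
-- ===== SOURCE B (Python) =====
-- def how_to_warehouse(list1: list) -> dict:
--     """Sort-then-run-length: flatten warehouse names, sort, count each run."""
--     names = sorted(ind['warehouse'] for row in list1 for ind in row)
--     result = {}
--     i, n = 0, len(names)
--     while i < n:
--         j = i
--         while j < n and names[j] == names[i]:
--             j += 1
--         result[names[i]] = j - i
--         i = j
--     return result
-- ===== Notes on version B (the rewrite author's own statement) =====
-- stated objective: alternative
-- what changed: Replaces the dict-counting pass followed by sorting the dict items with flatten-all-names, sort the whole name list once, then a single run-length scan over the sorted list that emits the counts already in key order.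
import Mathlib
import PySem

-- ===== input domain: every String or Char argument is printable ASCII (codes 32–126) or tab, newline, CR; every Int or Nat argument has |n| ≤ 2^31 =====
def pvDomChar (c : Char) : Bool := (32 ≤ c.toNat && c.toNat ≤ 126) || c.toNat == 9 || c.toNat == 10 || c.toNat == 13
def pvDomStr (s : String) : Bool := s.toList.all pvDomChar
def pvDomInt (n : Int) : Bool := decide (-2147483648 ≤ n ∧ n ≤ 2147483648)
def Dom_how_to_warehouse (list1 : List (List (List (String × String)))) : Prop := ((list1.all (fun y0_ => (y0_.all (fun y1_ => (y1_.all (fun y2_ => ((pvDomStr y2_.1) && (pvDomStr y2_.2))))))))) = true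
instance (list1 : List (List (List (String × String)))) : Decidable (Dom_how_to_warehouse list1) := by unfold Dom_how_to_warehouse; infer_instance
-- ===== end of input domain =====

-- B replaces A's dict-counting pass + item sort by one sort of all names and a run-length scan; equivalence proved on inputs whose operation dicts all carry the 'warehouse' key (else both raise KeyError).

-- ===== PORT A =====
-- ind['warehouse'] (first-match association-list lookup); total form, used only under Pre_ (key present)
def pvGetWarehouse (ind : List (String × String)) : String :=
  (PySem.Dict.mk ind).getD "warehouse" ""

def how_to_warehouse (list1 : List (List (List (String × String)))) : List (String × Int) :=
  let population : PySem.Dict String Int :=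
    list1.foldl (fun pop row =>
      row.foldl (fun pop ind =>
        let w := pvGetWarehouse ind
        let pop := if pop.contains w then pop else pop.insert w 0
        pop.insert w (pop.getD w 0 + 1)) pop) PySem.Dict.empty
  PySem.List.sorted population.items (fun p => p.1) false

-- ===== PORT B =====
-- the two nested whiles of Source B: the inner while measures the run of names[i] (takeWhile),
-- the outer advances i to the first different name (dropWhile); exact on every list
def pvRuns : List String → List (String × Int)
  | [] => []
  | x :: xs =>
      (x, ((xs.takeWhile (· == x)).length : Int) + 1) :: pvRuns (xs.dropWhile (· == x))
  termination_by l => l.length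
  decreasing_by simpa using Nat.lt_succ_of_le (List.length_dropWhile_le _ _)

def how_to_warehouse_alt (list1 : List (List (List (String × String)))) : List (String × Int) :=
  let names := PySem.List.sorted (list1.flatMap (fun row => row.map pvGetWarehouse)) (fun x => x) false
  pvRuns names

-- ===== PRECONDITION & SPEC =====
-- Pre_ excludes only inputs where some operation dict lacks the 'warehouse' key: there A (and B) raise KeyError.
def Pre_how_to_warehouse (list1 : List (List (List (String × String)))) : Prop :=
  ∀ row ∈ list1, ∀ ind ∈ row, "warehouse" ∈ ind.map Prod.fst
instance (list1 : List (List (List (String × String)))) : Decidable (Pre_how_to_warehouse list1) := by unfold Pre_how_to_warehouse; infer_instance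

def pvWitness_how_to_warehouse : (List (List (List (String × String)))) :=
  [[[("warehouse", "A"), ("item", "x")], [("warehouse", "B")]], [[("warehouse", "A")]]]

def Spec_how_to_warehouse (list1 : List (List (List (String × String)))) (out : List (String × Int)) : Prop := out = how_to_warehouse_alt list1
instance (list1 : List (List (List (String × String)))) (out : List (String × Int)) : Decidable (Spec_how_to_warehouse list1 out) := by unfold Spec_how_to_warehouse; infer_instance

-- ===== CLAIM (what is proved, stated in full; the proofs are below) =====
def Claim_equal_how_to_warehouse : Prop := ∀ (list1 : List (List (List (String × String)))), Dom_how_to_warehouse list1 → Pre_how_to_warehouse list1 → Spec_how_to_warehouse list1 (how_to_warehouse list1)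

-- ===== LEMMAS AND PROOFS =====

-- the flattened list of warehouse names, in A's (and Source B's comprehension's) traversal order
def pvNames (list1 : List (List (List (String × String)))) : List String :=
  list1.flatMap (fun row => row.map pvGetWarehouse)

-- A's loop body collapses to the plain counting insert
lemma pvStepA (pop : PySem.Dict String Int) (w : String) :
    (let pop' := if pop.contains w then pop else pop.insert w 0
     pop'.insert w (pop'.getD w 0 + 1)) = pop.insert w (pop.getD w 0 + 1) := by
  by_cases h : pop.contains w = true
  · simp [h]
  · simp only [h, if_false, Bool.false_eq_true]
    rw [PySem.Dict.getD_insert_self, PySem.Dict.insert_insert_self,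
        PySem.Dict.getD_of_not_contains _ _ (by simpa using h)]

-- A's population is Counter(pvNames list1)
lemma pvPopulation_eq_counter (list1 : List (List (List (String × String)))) :
    list1.foldl (fun pop row =>
      row.foldl (fun pop ind =>
        let w := pvGetWarehouse ind
        let pop := if pop.contains w then pop else pop.insert w 0
        pop.insert w (pop.getD w 0 + 1)) pop) PySem.Dict.empty
    = PySem.Dict.counter (pvNames list1) := by
  rw [← PySem.Dict.foldl_insert_getD_add_one_eq_counter, pvNames, List.foldl_flatMap]
  congr 1
  funext pop row
  rw [List.foldl_map]
  congr 1
  funext p ind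
  exact pvStepA p (pvGetWarehouse ind)

lemma pvRuns_fst_mem {l : List String} {p : String × Int} (h : p ∈ pvRuns l) : p.1 ∈ l := by
  induction l using pvRuns.induct with
  | case1 => simp [pvRuns] at h
  | case2 x xs ih =>
      rw [pvRuns] at h
      rcases List.mem_cons.mp h with h | h
      · simp [h]
      · exact List.mem_cons_of_mem _ ((List.dropWhile_sublist _).mem (ih h))

-- in a ≤-sorted list x :: xs, everything after the initial run of x is > x
lemma pvGtRest {x : String} {xs : List String} (hp : (x :: xs).Pairwise (· ≤ ·)) :
    ∀ y ∈ xs.dropWhile (· == x), x < y := by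
  intro y hy
  have hle : ∀ z ∈ xs, x ≤ z := fun z hz => (List.pairwise_cons.mp hp).1 z hz
  have hr : (xs.dropWhile (· == x)).Pairwise (· ≤ ·) :=
    (List.pairwise_cons.mp hp).2.sublist (List.dropWhile_sublist _)
  cases hrr : xs.dropWhile (· == x) with
  | nil => simp [hrr] at hy
  | cons h t =>
      have hhead : (h == x) = false := by
        have hne : xs.dropWhile (· == x) ≠ [] := by simp [hrr]
        have := List.head_dropWhile_not (· == x) (l := xs) hne
        rwa [show (xs.dropWhile (· == x)).head hne = h from by simp [hrr]] at this
      have hxh : x < h := lt_of_le_of_ne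
        (hle h ((List.dropWhile_sublist _).mem (by rw [hrr]; exact List.mem_cons_self)))
        (fun he => by simp [he] at hhead)
      rw [hrr] at hy
      rcases List.mem_cons.mp hy with rfl | hy
      · exact hxh
      · have : h ≤ y := by
          rw [hrr] at hr
          exact (List.pairwise_cons.mp hr).1 y hy
        exact lt_of_lt_of_le hxh this
  
lemma pvDiscard_eq_filter (s : List String) (x : String) :
    PySem.Set.discard s x = s.filter (fun y => !(y == x)) := by
  simp [PySem.Set.discard]

lemma pvDiscard_of_not_mem {s : List String} {x : String} (h : x ∉ s) :
    PySem.Set.discard s x = s := by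
  rw [pvDiscard_eq_filter]
  exact List.filter_eq_self.mpr (fun y hy => by
    simp only [Bool.not_eq_eq_eq_not, Bool.not_true, beq_eq_false_iff_ne, ne_eq]
    exact fun he => h (he ▸ hy))

lemma pvDiscard_ofList_takeWhile (t r : List String) (x : String) (ht : ∀ y ∈ t, y = x) :
    (PySem.Set.ofList (t ++ r)).discard x = (PySem.Set.ofList r).discard x := by
  induction t with
  | nil => rfl
  | cons y t' ih =>
      have hy : y = x := ht y List.mem_cons_self
      subst hy
      have step : (PySem.Set.ofList (y :: (t' ++ r))).discard y
          = (PySem.Set.ofList (t' ++ r)).discard y := by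
        rw [PySem.Set.ofList_cons,
            pvDiscard_eq_filter (y :: (PySem.Set.ofList (t' ++ r)).discard y) y,
            pvDiscard_eq_filter (PySem.Set.ofList (t' ++ r)) y]
        simp [List.filter_filter, Bool.and_self]
      rw [List.cons_append, step, ih (fun z hz => ht z (List.mem_cons_of_mem _ hz))]

-- run-length scan of a ≤-sorted list = distinct elements with their counts
lemma pvRuns_sorted_eq (l : List String) (hp : l.Pairwise (· ≤ ·)) :
    pvRuns l = (PySem.Set.ofList l).map (fun k => (k, (l.count k : Int))) := by
  induction l using pvRuns.induct with
  | case1 => simp [pvRuns]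
  | case2 x xs ih =>
      set t := xs.takeWhile (· == x) with htdef
      set r := xs.dropWhile (· == x) with hrdef
      have hxxs : t ++ r = xs := List.takeWhile_append_dropWhile
      have ht : ∀ y ∈ t, y = x := fun y hy => by
        have := List.mem_takeWhile_imp hy
        exact eq_of_beq (by simpa using this)
      have hgt : ∀ y ∈ r, x < y := pvGtRest hp
      have hnot : x ∉ r := fun h => lt_irrefl x (hgt x h)
      have hset : PySem.Set.ofList (x :: xs) = x :: PySem.Set.ofList r := by
        rw [PySem.Set.ofList_cons, ← hxxs, pvDiscard_ofList_takeWhile _ _ _ ht,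
            pvDiscard_of_not_mem (fun h => hnot ((PySem.Set.mem_ofList _ _).mp h))]
      have hcx : (x :: xs).count x = t.length + 1 := by
        have h1 : xs.count x = t.length := by
          rw [← hxxs, List.count_append, List.count_eq_zero.mpr hnot,
              List.count_eq_length.mpr (fun b hb => by simpa using (ht b hb).symm), Nat.add_zero]
        rw [List.count_cons_self, h1]
      have hck : ∀ k ∈ r, (x :: xs).count k = r.count k := by
        intro k hk
        have hxk : x ≠ k := fun he => hnot (by rw [he]; exact hk)
        have hkt : t.count k = 0 := List.count_eq_zero.mpr (fun hktm => hxk (ht k hktm).symm)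
        rw [List.count_cons, beq_eq_false_iff_ne.mpr hxk]
        simp only [Bool.false_eq_true, if_false, Nat.add_zero]
        rw [← hxxs, List.count_append, hkt]
        simp
      rw [pvRuns, hset, List.map_cons, ← htdef, ← hrdef,
          ih ((List.pairwise_cons.mp hp).2.sublist (List.dropWhile_sublist _))]
      refine congrArg₂ _ ?_ ?_
      · rw [hcx]; push_cast; ring_nf
      · exact (List.map_congr_left (fun k hk => by
          rw [hck k ((PySem.Set.mem_ofList _ _).mp hk)])).symm

lemma pvRuns_sorted_pairwise (l : List String) (hp : l.Pairwise (· ≤ ·)) :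
    (pvRuns l).Pairwise (fun a b => a.1 < b.1) := by
  induction l using pvRuns.induct with
  | case1 => simp [pvRuns]
  | case2 x xs ih =>
      rw [pvRuns]
      refine List.pairwise_cons.mpr ⟨?_, ih ((List.pairwise_cons.mp hp).2.sublist (List.dropWhile_sublist _))⟩
      intro p hpmem
      exact pvGtRest hp p.1 (pvRuns_fst_mem hpmem)

-- ===== VERDICT (by name: the statement is the Claim_ definition above) =====
theorem how_to_warehouse_spec : Claim_equal_how_to_warehouse := by
  intro list1 _ _
  unfold Spec_how_to_warehouse how_to_warehouse how_to_warehouse_alt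
  show PySem.List.sorted (list1.foldl (fun pop row =>
      row.foldl (fun pop ind =>
        let w := pvGetWarehouse ind
        let pop := if pop.contains w then pop else pop.insert w 0
        pop.insert w (pop.getD w 0 + 1)) pop) PySem.Dict.empty).items (fun p => p.1) false
    = pvRuns (PySem.List.sorted (list1.flatMap (fun row => row.map pvGetWarehouse)) (fun x => x) false)
  rw [pvPopulation_eq_counter, PySem.Dict.items_counter]
  set ws := pvNames list1 with hws
  set l := PySem.List.sorted ws (fun x => x) false with hl
  have hperm : l.Perm ws := PySem.List.sorted_perm ws (fun x => x) false
  have hps : l.Pairwise (· ≤ ·) := by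
    simpa using PySem.List.sorted_pairwise ws (fun x => x)
  have hruns := pvRuns_sorted_eq l hps
  refine PySem.List.sorted_eq_of_perm_of_pairwise_lt _ (pvRuns l) (fun p => p.1) ?_
    (pvRuns_sorted_pairwise l hps)
  rw [hruns]
  have hcount : (fun k => (k, (l.count k : Int))) = (fun k => (k, (ws.count k : Int))) := by
    funext k; simp [hperm.count_eq]
  rw [hcount]
  exact ((List.perm_ext_iff_of_nodup (PySem.Set.nodup_ofList _) (PySem.Set.nodup_ofList _)).mpr
    (fun a => by simp [PySem.Set.mem_ofList, hperm.mem_iff])).map _
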